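-- pv_equiv track=rewrite | github.com/ApekshaMundey/Level2_SentimentAnalysis | app.py | detect_sentiment_shift
-- ===== SOURCE A (Python) =====
-- positive_words = {"amazing", "great", "awesome", "good", "love", "excellent", "fantastic", "enjoy"}
--
-- negative_words = {"bad", "boring", "waste", "wasting", "terrible", "worst", "poor", "disappointing"}
--
-- def detect_sentiment_shift(text):
--     words = [w.strip(".,!?").lower() for w in text.split()]
--
--     pos_seen = False
--
--     for w in words:
--         if w in positive_words:
--             pos_seen = True
--
--         elif pos_seen and w in negative_words:
--             return True
--
--     return False
-- ===== SOURCE B (Python) =====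
-- positive_words = {"amazing", "great", "awesome", "good", "love", "excellent", "fantastic", "enjoy"}
--
-- negative_words = {"bad", "boring", "waste", "wasting", "terrible", "worst", "poor", "disappointing"}
--
-- def _normalize(w):
--     return w.strip(".,!?").lower()
--
-- def detect_sentiment_shift(text):
--     words = list(map(_normalize, text.split()))
--     pos_idx = [i for i, w in enumerate(words) if w in positive_words]
--     neg_idx = [i for i, w in enumerate(words) if w in negative_words]
--     return bool(pos_idx) and bool(neg_idx) and min(pos_idx) < max(neg_idx)
-- ===== Notes on version B (the rewrite author's own statement) =====
-- stated objective: alternative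
-- what changed: Replaced the stateful early-returning scan (pos_seen flag) by an index-based formulation: collect all positive and all negative word positions and compare min(pos_idx) < max(neg_idx).
import Mathlib
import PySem

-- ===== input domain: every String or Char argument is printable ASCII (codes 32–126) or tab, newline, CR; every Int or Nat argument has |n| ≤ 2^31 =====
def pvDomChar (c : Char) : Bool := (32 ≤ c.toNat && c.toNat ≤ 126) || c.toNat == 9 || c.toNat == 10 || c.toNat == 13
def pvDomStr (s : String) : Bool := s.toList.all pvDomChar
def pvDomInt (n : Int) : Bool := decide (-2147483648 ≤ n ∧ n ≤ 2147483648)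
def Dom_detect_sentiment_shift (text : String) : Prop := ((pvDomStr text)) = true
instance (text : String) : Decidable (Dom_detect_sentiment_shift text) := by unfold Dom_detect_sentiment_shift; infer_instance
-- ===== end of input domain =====

-- B replaces A's stateful early-returning scan (pos_seen flag) by an index-based formulation:
-- collect all positive and all negative word positions and compare min(pos_idx) < max(neg_idx)
-- (objective: alternative).

-- module-level constants shared by both versions (same in Source A and Source B)
def pvPositiveWords : PySem.Set String :=
  PySem.Set.ofList ["amazing", "great", "awesome", "good", "love", "excellent", "fantastic", "enjoy"]

def pvNegativeWords : PySem.Set String :=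
  PySem.Set.ofList ["bad", "boring", "waste", "wasting", "terrible", "worst", "poor", "disappointing"]

def pvNormalize (text : String) : List String :=
  (PySem.Str.split₀ text).map (fun w => PySem.Str.lower (PySem.Str.stripChars w ".,!?"))

-- ===== PORT A =====
-- A's loop with early return, as structural recursion over the word list carrying pos_seen
def pvLoopA : List String → Bool → Bool
  | [], _ => false
  | w :: ws, posSeen =>
    if pvPositiveWords.contains w then pvLoopA ws true
    else if posSeen && pvNegativeWords.contains w then true
    else pvLoopA ws posSeen

def detect_sentiment_shift (text : String) : Bool :=
  pvLoopA (pvNormalize text) false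

-- ===== PORT B =====
-- '[i for i, w in enumerate(words) if w in S]'
def pvIdxWhere (S : PySem.Set String) (ws : List String) : List Int :=
  (PySem.List.enumerate ws 0).filterMap (fun p => if S.contains p.2 then some p.1 else none)

def detect_sentiment_shift_alt (text : String) : Bool :=
  let words := pvNormalize text
  let posIdx := pvIdxWhere pvPositiveWords words
  let negIdx := pvIdxWhere pvNegativeWords words
  !posIdx.isEmpty && !negIdx.isEmpty &&
    (match PySem.List.min? posIdx (fun x => x), PySem.List.max? negIdx (fun x => x) with
     | some a, some b => decide (a < b)
     | _, _ => false)   -- unreachable under the nonemptiness guards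

-- ===== PRECONDITION & SPEC =====
def Spec_detect_sentiment_shift (text : String) (out : Bool) : Prop := out = detect_sentiment_shift_alt text
instance (text : String) (out : Bool) : Decidable (Spec_detect_sentiment_shift text out) := by unfold Spec_detect_sentiment_shift; infer_instance

-- ===== CLAIM (what is proved, stated in full; the proofs are below) =====
def Claim_equal_detect_sentiment_shift : Prop := ∀ (text : String), Dom_detect_sentiment_shift text → Spec_detect_sentiment_shift text (detect_sentiment_shift text)

-- ===== LEMMAS AND PROOFS =====

-- generalized index comprehension, with an arbitrary start index
def pvGIdx (S : PySem.Set String) (ws : List String) (s : Int) : List Int :=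
  (PySem.List.enumerate ws s).filterMap (fun p => if S.contains p.2 then some p.1 else none)

theorem pvGIdx_zero (S : PySem.Set String) (ws : List String) :
    pvGIdx S ws 0 = pvIdxWhere S ws := rfl

theorem pvGIdx_cons (S : PySem.Set String) (w : String) (ws : List String) (s : Int) :
    pvGIdx S (w :: ws) s =
      if S.contains w then s :: pvGIdx S ws (s + 1) else pvGIdx S ws (s + 1) := by
  by_cases h : w ∈ S <;>
    simp [pvGIdx, PySem.List.enumerate_cons, h]

theorem pvGIdx_lb (S : PySem.Set String) (ws : List String) (s : Int) :
    ∀ x ∈ pvGIdx S ws s, s ≤ x := by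
  intro x hx
  simp only [pvGIdx, List.mem_filterMap] at hx
  obtain ⟨p, hp, hf⟩ := hx
  rw [PySem.List.mem_enumerate_iff] at hp
  obtain ⟨k, hk, rfl⟩ := hp
  split at hf
  · cases hf; omega
  · cases hf

-- the positive and negative word sets are disjoint
theorem pv_disjoint (w : String) (h : w ∈ pvPositiveWords) :
    w ∉ pvNegativeWords := by
  simp only [pvPositiveWords, PySem.Set.mem_ofList, List.mem_cons, List.not_mem_nil, or_false] at h
  rcases h with h | h | h | h | h | h | h | h <;> subst h <;> decide

-- once pos_seen is true, A's loop just searches for a negative word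
theorem pvLoopA_true (ws : List String) :
    pvLoopA ws true = ws.any (fun v => pvNegativeWords.contains v) := by
  induction ws with
  | nil => rfl
  | cons w ws ih =>
    by_cases hp : w ∈ pvPositiveWords
    · simp [pvLoopA, hp, ih, pv_disjoint w hp]
    · by_cases hn : w ∈ pvNegativeWords
      · simp [pvLoopA, hp, hn]
      · simp [pvLoopA, hp, hn, ih]

-- searching for a negative word = the negative index list being nonempty
theorem pv_any_eq_not_isEmpty (ws : List String) (s : Int) :
    ws.any (fun v => decide (v ∈ pvNegativeWords)) = !(pvGIdx pvNegativeWords ws s).isEmpty := by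
  induction ws generalizing s with
  | nil => simp [pvGIdx, PySem.List.enumerate_nil]
  | cons w ws ih =>
    by_cases hn : w ∈ pvNegativeWords <;> rw [pvGIdx_cons] <;> simp [hn]
    simpa using ih (s + 1)
-- a head that bounds the tail from below is the minimum
theorem pv_min_dom (x : Int) (t : List Int) (h : ∀ y ∈ t, x ≤ y) :
    PySem.List.min? (x :: t) (fun y => y) = some x := by
  rw [PySem.List.min?_id_cons]
  congr 1
  induction t generalizing x with
  | nil => rfl
  | cons y t ih =>
    have hxy : x ≤ y := h y (by simp)
    simp only [List.foldl_cons, min_eq_left hxy]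
    exact ih x (fun z hz => h z (by simp [hz]))

-- a head bounded above by a nonempty tail does not affect the maximum
theorem pv_max_dom (x : Int) (z : Int) (t : List Int) (h : x ≤ z) :
    PySem.List.max? (x :: z :: t) (fun y => y) = PySem.List.max? (z :: t) (fun y => y) := by
  rw [PySem.List.max?_id_cons, PySem.List.max?_id_cons]
  simp [max_eq_right h]

-- main invariant: the index-comparison condition equals A's loop from a fresh state
theorem pv_main (ws : List String) (s : Int) :
    (!(pvGIdx pvPositiveWords ws s).isEmpty && !(pvGIdx pvNegativeWords ws s).isEmpty &&
      (match PySem.List.min? (pvGIdx pvPositiveWords ws s) (fun x => x),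
             PySem.List.max? (pvGIdx pvNegativeWords ws s) (fun x => x) with
       | some a, some b => decide (a < b)
       | _, _ => false)) = pvLoopA ws false := by
  induction ws generalizing s with
  | nil => simp [pvGIdx, PySem.List.enumerate_nil, pvLoopA]
  | cons w ws ih =>
    by_cases hp : w ∈ pvPositiveWords
    · -- first positive word found at index s; the tail only needs a negative word
      have hn := pv_disjoint w hp
      rw [pvGIdx_cons, pvGIdx_cons]
      have hmin : PySem.List.min? (s :: pvGIdx pvPositiveWords ws (s + 1)) (fun y => y) = some s :=
        pv_min_dom s _ (fun y hy => by have := pvGIdx_lb pvPositiveWords ws (s + 1) y hy; omega)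
      have hany := pv_any_eq_not_isEmpty ws (s + 1)
      cases hN : pvGIdx pvNegativeWords ws (s + 1) with
      | nil =>
        rw [hN] at hany
        simp [hp, hn, pvLoopA, pvLoopA_true, hany]
      | cons z t =>
        rw [hN] at hany
        have hzt : ∀ y ∈ z :: t, s + 1 ≤ y := fun y hy => pvGIdx_lb _ ws (s + 1) y (hN ▸ hy)
        have hmax : s < t.foldl max z := by
          rcases PySem.List.foldl_max_mem t z with h | h
          · have := hzt z (by simp); omega
          · have := hzt _ (List.mem_cons_of_mem _ h); omega
        simp [hp, hn, pvLoopA, pvLoopA_true, hmin, hany, PySem.List.max?_id_cons, hmax]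
    · by_cases hn : w ∈ pvNegativeWords
      · -- negative word at index s: too early to matter (every positive index is later)
        rw [pvGIdx_cons, pvGIdx_cons]
        have hrec := ih (s + 1)
        cases hP : pvGIdx pvPositiveWords ws (s + 1) with
        | nil =>
          rw [hP] at hrec
          simp [hp, hn, pvLoopA, ← hrec]
        | cons p t =>
          rw [hP] at hrec
          have hpt : ∀ y ∈ p :: t, s + 1 ≤ y := fun y hy => pvGIdx_lb _ ws (s + 1) y (hP ▸ hy)
          have hmin : s + 1 ≤ t.foldl min p := by
            rcases PySem.List.foldl_min_mem t p with h | h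
            · have := hpt p (by simp); omega
            · have := hpt _ (List.mem_cons_of_mem _ h); omega
          cases hN : pvGIdx pvNegativeWords ws (s + 1) with
          | nil =>
            rw [hN] at hrec
            have : ¬ (t.foldl min p < s) := by omega
            simp [hp, hn, pvLoopA, ← hrec, PySem.List.min?_id_cons, PySem.List.max?_id_cons, this]
          | cons z u =>
            rw [hN] at hrec
            have hz : s ≤ z := by
              have := pvGIdx_lb pvNegativeWords ws (s + 1) z (hN ▸ (by simp : z ∈ z :: u)); omega
            simp [hp, hn, pvLoopA, pv_max_dom s z u hz, ← hrec]
      · -- neutral word: both sides recurse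
        rw [pvGIdx_cons, pvGIdx_cons]
        simp [hp, hn, pvLoopA]
        exact ih (s + 1)

-- ===== VERDICT (by name: the statement is the Claim_ definition above) =====
theorem detect_sentiment_shift_spec : Claim_equal_detect_sentiment_shift := by
  intro text _
  unfold Spec_detect_sentiment_shift detect_sentiment_shift detect_sentiment_shift_alt
  simp only [← pvGIdx_zero]
  exact (pv_main (pvNormalize text) 0).symm
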